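-- pv_equiv track=rewrite | github.com/alexandraback/datacollection | solutions_5639104758808576_0/Python/Jozko/standing.py | solve
-- ===== SOURCE A (Python) =====
-- def solve(sNums):
--     standing = 0
--     extra = 0
--     for sLevel, nPeople in enumerate(sNums):
--         if nPeople > 0:
--             if standing >= sLevel:
--                 standing += nPeople
--             else:
--                 need = sLevel - standing
--                 standing += need
--                 extra += need
--                 standing += nPeople
--     return extra
-- ===== SOURCE B (Python) =====
-- def solve(sNums):
--     # Stage 1: for each level, how many (real) people sit strictly below it.
--     seated = []
--     total = 0
--     for n in sNums:
--         seated.append(total)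
--         if n > 0:
--             total += n
--     # Stage 2: the answer is the largest deficit level - seated[level]
--     # over non-empty levels, clamped at 0.
--     deficits = [i - s for i, (n, s) in enumerate(zip(sNums, seated)) if n > 0]
--     return max([0] + deficits)
-- ===== Notes on version B (the rewrite author's own statement) =====
-- stated objective: simpler
-- what changed: B replaces A's incremental state machine by two staged passes: it first materialises the list of people seated below each level, then returns the maximum deficit level - seated[level] over non-empty levels (clamped at 0) via a comprehension and max.
import Mathlib
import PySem

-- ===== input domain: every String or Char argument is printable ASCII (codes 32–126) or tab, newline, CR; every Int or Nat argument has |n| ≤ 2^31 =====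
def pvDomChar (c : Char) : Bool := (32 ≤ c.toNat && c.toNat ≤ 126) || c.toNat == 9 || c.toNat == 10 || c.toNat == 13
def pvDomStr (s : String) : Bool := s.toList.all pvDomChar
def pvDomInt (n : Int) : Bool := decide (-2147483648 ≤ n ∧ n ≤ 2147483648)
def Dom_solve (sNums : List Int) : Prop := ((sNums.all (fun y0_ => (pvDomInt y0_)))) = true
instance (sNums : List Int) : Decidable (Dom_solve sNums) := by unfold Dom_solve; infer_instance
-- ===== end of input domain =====

-- B replaces A's incremental state machine by two staged passes (seated-below list,
-- then max deficit over non-empty levels); objective: simpler.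

-- ===== PORT A =====
def solveStep (st : Int × Int) (p : Int × Int) : Int × Int :=
  if p.2 > 0 then
    if st.1 ≥ p.1 then (st.1 + p.2, st.2)
    else (p.1 - st.1 + st.1 + p.2, st.2 + (p.1 - st.1))
  else st

def solve (sNums : List Int) : Int :=
  ((PySem.List.enumerate sNums 0).foldl solveStep (0, 0)).2

-- ===== PORT B =====
-- stage 1: people seated strictly below each level
def seatedBelow (total : Int) : List Int → List Int
  | [] => []
  | n :: rest => total :: seatedBelow (if n > 0 then total + n else total) rest

-- stage 2 result (the comprehension); max([0]+deficits) is deficits.foldl max 0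
def solve_alt (sNums : List Int) : Int :=
  (((PySem.List.enumerate (sNums.zip (seatedBelow 0 sNums)) 0).filter
      (fun p => p.2.1 > 0)).map (fun p => p.1 - p.2.2)).foldl max 0

-- ===== PRECONDITION & SPEC =====
def Spec_solve (sNums : List Int) (out : Int) : Prop := out = solve_alt sNums
instance (sNums : List Int) (out : Int) : Decidable (Spec_solve sNums out) := by unfold Spec_solve; infer_instance

-- ===== CLAIM (what is proved, stated in full; the proofs are below) =====
def Claim_equal_solve : Prop := ∀ (sNums : List Int), Dom_solve sNums → Spec_solve sNums (solve sNums)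

-- ===== LEMMAS AND PROOFS =====

-- Invariant: with a = real people seated so far and e = extras so far, A's standing is a + e,
-- and folding max over B's remaining deficits from e gives A's final extra.
theorem solve_fold_key (sNums : List Int) : ∀ (i a e : Int),
    ((PySem.List.enumerate sNums i).foldl solveStep (a + e, e)).2 =
      (((PySem.List.enumerate (sNums.zip (seatedBelow a sNums)) i).filter
          (fun p => p.2.1 > 0)).map (fun p => p.1 - p.2.2)).foldl max e := by
  induction sNums with
  | nil => intro i a e; simp [PySem.List.enumerate_nil]
  | cons n rest ih =>
    intro i a e
    simp only [seatedBelow, List.zip_cons_cons, PySem.List.enumerate_cons, List.foldl_cons,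
      List.filter_cons, solveStep]
    by_cases hn : n > 0
    · simp only [hn, decide_true, if_true, List.map_cons, List.foldl_cons]
      by_cases hs : a + e ≥ i
      · have hmax : max e (i - a) = e := by omega
        rw [if_pos hs, hmax]
        have := ih (i + 1) (a + n) e
        rw [show a + e + n = a + n + e by ring]
        exact this
      · have hmax : max e (i - a) = i - a := by omega
        rw [if_neg hs, hmax]
        have := ih (i + 1) (a + n) (i - a)
        rw [show i - (a + e) + (a + e) + n = a + n + (i - a) by ring,
            show e + (i - (a + e)) = i - a by ring]
        exact this
    · have hn' : ¬ (decide (n > 0) = true) := by simpa using hn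
      simp only [hn', if_neg hn, Bool.false_eq_true, if_false]
      exact ih (i + 1) a e

-- ===== VERDICT (by name: the statement is the Claim_ definition above) =====
theorem solve_spec : Claim_equal_solve := by
  intro sNums _
  unfold Spec_solve solve solve_alt
  have := solve_fold_key sNums 0 0 0
  simpa using this
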